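-- pv_equiv track=rewrite | github.com/lastHunter956/NLP-5029 | courseNLP/Actividades/logic/text_processing.py | _apply_negation_window
-- ===== SOURCE A (Python) =====
-- _NEG_STOP: frozenset = frozenset({
--     'y', 'pero', 'sin', 'embargo', 'aunque', 'que', 'porque',
--     'o', 'ni', 'sino', 'a', ',', '.', '!', '?',
-- })
--
-- def _apply_negation_window(tokens: list, window: int = 4) -> list:
--     """Propaga negación hasta ``window`` tokens o hasta un stop-token.
--
--     Ejemplo:
--         ["no", "creo", "que", "sea", "bueno"] → window=4
--         → ["no", "neg_creo", "que", "sea", "neg_bueno"]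
--         (se detiene en 'que' que es _NEG_STOP)
--
--     Los clíticos pronominales ya se compoundearon en el paso anterior
--     (no_me, no_te, etc.), así que aquí solo se propaga sobre palabras
--     de contenido.
--     """
--     _NEG_TRIGGERS = frozenset({
--         'no', 'nunca', 'jamas', 'tampoco', 'nadie', 'nada', 'ningun', 'ninguna',
--     })
--     result = list(tokens)
--     i = 0
--     while i < len(tokens):
--         tok = tokens[i].lower()
--         # Fix: detectar tanto 'no' standalone como compuestos 'no_me', 'no_te', etc.
--         is_neg = tok in _NEG_TRIGGERS or tok.startswith('no_')
--         if is_neg: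
--             count = 0
--             j = i + 1
--             while j < len(tokens) and count < window:
--                 if tokens[j].lower() in _NEG_STOP:
--                     break
--                 # Marcar token negado solo si no está ya compoundeado o negado
--                 if '_' not in tokens[j] and not tokens[j].startswith('neg_'):
--                     result[j] = 'neg_' + tokens[j]
--                 count += 1
--                 j += 1
--         i += 1
--     return result
-- ===== SOURCE B (Python) =====
-- _NEG_STOP: frozenset = frozenset({
--     'y', 'pero', 'sin', 'embargo', 'aunque', 'que', 'porque',
--     'o', 'ni', 'sino', 'a', ',', '.', '!', '?',
-- })
--
-- _NEG_TRIGGERS = frozenset({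
--     'no', 'nunca', 'jamas', 'tampoco', 'nadie', 'nada', 'ningun', 'ninguna',
-- })
--
--
-- def _apply_negation_window(tokens: list, window: int = 4) -> list:
--     """Single forward pass: `remaining` counts propagation steps still open."""
--     result = list(tokens)
--     remaining = 0
--     for p, raw in enumerate(tokens):
--         t = raw.lower()
--         if t in _NEG_STOP:
--             remaining = 0
--         else:
--             if remaining > 0:
--                 if '_' not in raw and not raw.startswith('neg_'):
--                     result[p] = 'neg_' + raw
--                 remaining -= 1
--             if t in _NEG_TRIGGERS or t.startswith('no_'):
--                 remaining = window
--     return result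
-- ===== Notes on version B (the rewrite author's own statement) =====
-- stated objective: simpler
-- what changed: Replaced A's nested scans (for every trigger, an inner window-marking loop ahead) by a single forward pass carrying an integer `remaining` counter of propagation steps still open, reset by stop-tokens and refilled by triggers.
import Mathlib
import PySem

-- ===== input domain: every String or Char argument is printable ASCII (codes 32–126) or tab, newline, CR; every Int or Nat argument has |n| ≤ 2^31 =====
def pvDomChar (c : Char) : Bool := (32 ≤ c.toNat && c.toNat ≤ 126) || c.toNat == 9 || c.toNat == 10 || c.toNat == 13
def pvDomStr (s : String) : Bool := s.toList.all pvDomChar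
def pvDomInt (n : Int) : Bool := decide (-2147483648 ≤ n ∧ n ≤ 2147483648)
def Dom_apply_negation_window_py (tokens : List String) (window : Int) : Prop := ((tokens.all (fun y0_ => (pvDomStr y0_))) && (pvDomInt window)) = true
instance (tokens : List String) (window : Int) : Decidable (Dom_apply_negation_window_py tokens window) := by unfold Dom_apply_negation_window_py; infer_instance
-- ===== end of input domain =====

-- B replaces A's nested trigger-then-window scans by one forward pass carrying a
-- `remaining` counter (objective: simpler single-pass state machine, same result).

def pvNegStop : List String :=
  ["y", "pero", "sin", "embargo", "aunque", "que", "porque",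
   "o", "ni", "sino", "a", ",", ".", "!", "?"]

def pvNegTriggers : List String :=
  ["no", "nunca", "jamas", "tampoco", "nadie", "nada", "ningun", "ninguna"]

-- ===== PORT A =====
-- A's inner while loop: mark up to `window` tokens after a trigger, stop at a stop-token.
def pvAInner (tokens : List String) (window : Int) (res : List String)
    (count : Int) (j : Nat) : List String :=
  if h : j < tokens.length ∧ count < window then
    if pvNegStop.contains (PySem.Str.lower tokens[j]) then res
    else
      let res' :=
        if !PySem.Str.isIn "_" tokens[j] && !PySem.Str.startswith tokens[j] "neg_" then
          res.set j ("neg_" ++ tokens[j])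
        else res
      pvAInner tokens window res' (count + 1) (j + 1)
  else res
termination_by tokens.length - j
decreasing_by omega

-- A's outer while loop over every index i.
def pvAOuter (tokens : List String) (window : Int) (res : List String) (i : Nat) : List String :=
  if h : i < tokens.length then
    let tok := PySem.Str.lower tokens[i]
    let res' :=
      if pvNegTriggers.contains tok || PySem.Str.startswith tok "no_" then
        pvAInner tokens window res 0 (i + 1)
      else res
    pvAOuter tokens window res' (i + 1)
  else res
termination_by tokens.length - i
decreasing_by omega

def apply_negation_window_py (tokens : List String) (window : Int) : List String :=
  pvAOuter tokens window tokens 0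

-- ===== PORT B =====
-- B: one forward pass; `remaining` = propagation steps still open.
def pvBLoop (tokens : List String) (window : Int) (res : List String)
    (remaining : Int) (p : Nat) : List String :=
  if h : p < tokens.length then
    let raw := tokens[p]
    let t := PySem.Str.lower raw
    if pvNegStop.contains t then
      pvBLoop tokens window res 0 (p + 1)
    else
      let res' :=
        if remaining > 0 then
          if !PySem.Str.isIn "_" raw && !PySem.Str.startswith raw "neg_" then
            res.set p ("neg_" ++ raw)
          else res
        else res
      let remaining' := if remaining > 0 then remaining - 1 else remaining
      if pvNegTriggers.contains t || PySem.Str.startswith t "no_" then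
        pvBLoop tokens window res' window (p + 1)
      else
        pvBLoop tokens window res' remaining' (p + 1)
  else res
termination_by tokens.length - p
decreasing_by all_goals omega

def apply_negation_window_py_alt (tokens : List String) (window : Int) : List String :=
  pvBLoop tokens window tokens 0 0

-- ===== PRECONDITION & SPEC =====
def Spec_apply_negation_window_py (tokens : List String) (window : Int) (out : List String) : Prop := out = apply_negation_window_py_alt tokens window
instance (tokens : List String) (window : Int) (out : List String) : Decidable (Spec_apply_negation_window_py tokens window out) := by unfold Spec_apply_negation_window_py; infer_instance

-- ===== CLAIM (what is proved, stated in full; the proofs are below) =====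
def Claim_equal_apply_negation_window_py : Prop := ∀ (tokens : List String) (window : Int), Dom_apply_negation_window_py tokens window → Spec_apply_negation_window_py tokens window (apply_negation_window_py tokens window)

-- ===== LEMMAS AND PROOFS =====

-- Proof-side helpers: single-position mark, and A's inner loop re-indexed by remaining budget.
def pvMark (tokens : List String) (j : Nat) (res : List String) : List String :=
  if !PySem.Str.isIn "_" (tokens.getD j "") && !PySem.Str.startswith (tokens.getD j "") "neg_" then
    res.set j ("neg_" ++ tokens.getD j "")
  else res

def pvMarkW (tokens : List String) (b : Int) (j : Nat) (res : List String) : List String :=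
  if h : j < tokens.length ∧ 0 < b then
    if pvNegStop.contains (PySem.Str.lower tokens[j]) then res
    else pvMarkW tokens (b - 1) (j + 1) (pvMark tokens j res)
  else res
termination_by tokens.length - j
decreasing_by omega

theorem pvMarkW_oob (tokens : List String) (b : Int) (j : Nat) (res : List String)
    (hj : ¬ j < tokens.length) : pvMarkW tokens b j res = res := by
  rw [pvMarkW]; simp [hj]

theorem pvMarkW_nonpos (tokens : List String) (b : Int) (j : Nat) (res : List String)
    (hb : b ≤ 0) : pvMarkW tokens b j res = res := by
  rw [pvMarkW]; simp; omega

theorem pvMarkW_step (tokens : List String) (b : Int) (j : Nat) (res : List String)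
    (hj : j < tokens.length) (hb : 0 < b) :
    pvMarkW tokens b j res =
      if pvNegStop.contains (PySem.Str.lower (tokens[j]'hj)) then res
      else pvMarkW tokens (b - 1) (j + 1) (pvMark tokens j res) := by
  rw [pvMarkW, dif_pos ⟨hj, hb⟩]

theorem pvMark_idem (tokens : List String) (j : Nat) (res : List String) :
    pvMark tokens j (pvMark tokens j res) = pvMark tokens j res := by
  unfold pvMark; split_ifs <;> simp_all [List.set_set]

theorem pvMark_comm (tokens : List String) (j k : Nat) (res : List String) (h : j ≠ k) :
    pvMark tokens j (pvMark tokens k res) = pvMark tokens k (pvMark tokens j res) := by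
  unfold pvMark; split_ifs <;> first | rfl | exact List.set_comm _ _ (by omega)

theorem pvMark_pvMarkW_comm (tokens : List String) (c : Int) (j k : Nat)
    (res : List String) (h : j < k) :
    pvMark tokens j (pvMarkW tokens c k res) = pvMarkW tokens c k (pvMark tokens j res) := by
  have H : ∀ n (c : Int) k res, tokens.length - k ≤ n → j < k →
      pvMark tokens j (pvMarkW tokens c k res) = pvMarkW tokens c k (pvMark tokens j res) := by
    intro n
    induction n with
    | zero =>
      intro c k res hn hjk
      have hk : ¬ k < tokens.length := by omega
      simp [pvMarkW_oob tokens _ _ _ hk]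
    | succ n ih =>
      intro c k res hn hjk
      by_cases hk : k < tokens.length
      · by_cases hc : 0 < c
        · rw [pvMarkW_step tokens c k res hk hc, pvMarkW_step tokens c k (pvMark tokens j res) hk hc]
          by_cases hs : pvNegStop.contains (PySem.Str.lower (tokens[k]'hk)) = true
          · rw [if_pos hs, if_pos hs]
          · rw [if_neg hs, if_neg hs,
                ih (c - 1) (k + 1) (pvMark tokens k res) (by omega) (by omega),
                pvMark_comm tokens k j res (by omega)]
        · simp [pvMarkW_nonpos tokens c _ _ (by omega)]
      · simp [pvMarkW_oob tokens _ _ _ hk]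
  exact H (tokens.length - k) c k res le_rfl h

theorem pvMarkW_absorb (tokens : List String) (b c : Int) (j : Nat)
    (res : List String) (hcb : c ≤ b) :
    pvMarkW tokens b j (pvMarkW tokens c j res) = pvMarkW tokens b j res := by
  have H : ∀ n (b c : Int) j res, tokens.length - j ≤ n → c ≤ b →
      pvMarkW tokens b j (pvMarkW tokens c j res) = pvMarkW tokens b j res := by
    intro n
    induction n with
    | zero =>
      intro b c j res hn hcb
      have hj : ¬ j < tokens.length := by omega
      simp [pvMarkW_oob tokens _ _ _ hj]
    | succ n ih =>
      intro b c j res hn hcb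
      by_cases hj : j < tokens.length
      · by_cases hc : 0 < c
        · have hb : 0 < b := by omega
          rw [pvMarkW_step tokens c j res hj hc]
          by_cases hs : pvNegStop.contains (PySem.Str.lower (tokens[j]'hj)) = true
          · rw [if_pos hs]
          · rw [if_neg hs]
            rw [pvMarkW_step tokens b j _ hj hb, if_neg hs]
            rw [pvMark_pvMarkW_comm tokens (c - 1) j (j + 1) (pvMark tokens j res) (by omega)]
            rw [pvMark_idem]
            rw [ih (b - 1) (c - 1) (j + 1) (pvMark tokens j res) (by omega) (by omega)]
            rw [pvMarkW_step tokens b j res hj hb, if_neg hs]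
        · rw [pvMarkW_nonpos tokens c _ _ (by omega)]
      · simp [pvMarkW_oob tokens _ _ _ hj]
  exact H (tokens.length - j) b c j res le_rfl hcb

-- A's inner loop IS pvMarkW with remaining budget window - count.
theorem pvAInner_oob (tokens : List String) (window : Int) (res : List String)
    (count : Int) (j : Nat) (h : ¬ (j < tokens.length ∧ count < window)) :
    pvAInner tokens window res count j = res := by
  rw [pvAInner, dif_neg h]

theorem pvAInner_step (tokens : List String) (window : Int) (res : List String)
    (count : Int) (j : Nat) (hj : j < tokens.length) (hc : count < window) :
    pvAInner tokens window res count j =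
      if pvNegStop.contains (PySem.Str.lower (tokens[j]'hj)) then res
      else pvAInner tokens window (pvMark tokens j res) (count + 1) (j + 1) := by
  rw [pvAInner, dif_pos ⟨hj, hc⟩]
  simp only [pvMark, List.getD_eq_getElem tokens "" hj]

theorem pvAInner_eq_pvMarkW (tokens : List String) (window : Int) (res : List String)
    (count : Int) (j : Nat) :
    pvAInner tokens window res count j = pvMarkW tokens (window - count) j res := by
  have H : ∀ n (count : Int) j res, tokens.length - j ≤ n →
      pvAInner tokens window res count j = pvMarkW tokens (window - count) j res := by
    intro n
    induction n with
    | zero =>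
      intro count j res hn
      have hj : ¬ j < tokens.length := by omega
      rw [pvAInner_oob tokens window res count j (by omega), pvMarkW_oob tokens _ _ _ hj]
    | succ n ih =>
      intro count j res hn
      by_cases hj : j < tokens.length
      · by_cases hc : count < window
        · rw [pvAInner_step tokens window res count j hj hc,
              pvMarkW_step tokens (window - count) j res hj (by omega)]
          by_cases hs : pvNegStop.contains (PySem.Str.lower (tokens[j]'hj)) = true
          · rw [if_pos hs, if_pos hs]
          · rw [if_neg hs, if_neg hs]
            rw [ih (count + 1) (j + 1) (pvMark tokens j res) (by omega)]
            congr 1; omega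
        · rw [pvAInner_oob tokens window res count j (by omega),
              pvMarkW_nonpos tokens _ _ _ (by omega)]
      · rw [pvAInner_oob tokens window res count j (by omega), pvMarkW_oob tokens _ _ _ hj]
  exact H (tokens.length - j) count j res le_rfl

theorem pvAOuter_oob (tokens : List String) (window : Int) (res : List String)
    (i : Nat) (hi : ¬ i < tokens.length) : pvAOuter tokens window res i = res := by
  rw [pvAOuter, dif_neg hi]

theorem pvAOuter_step (tokens : List String) (window : Int) (res : List String)
    (i : Nat) (hi : i < tokens.length) :
    pvAOuter tokens window res i =
      pvAOuter tokens window
        (if pvNegTriggers.contains (PySem.Str.lower (tokens[i]'hi)) ||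
            PySem.Str.startswith (PySem.Str.lower (tokens[i]'hi)) "no_" then
          pvAInner tokens window res 0 (i + 1)
        else res) (i + 1) := by
  rw [pvAOuter, dif_pos hi]

theorem pvBLoop_oob (tokens : List String) (window : Int) (res : List String)
    (r : Int) (p : Nat) (hp : ¬ p < tokens.length) : pvBLoop tokens window res r p = res := by
  rw [pvBLoop, dif_neg hp]

theorem pvBLoop_step (tokens : List String) (window : Int) (res : List String)
    (r : Int) (p : Nat) (hp : p < tokens.length) :
    pvBLoop tokens window res r p =
      if pvNegStop.contains (PySem.Str.lower (tokens[p]'hp)) then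
        pvBLoop tokens window res 0 (p + 1)
      else
        if pvNegTriggers.contains (PySem.Str.lower (tokens[p]'hp)) ||
            PySem.Str.startswith (PySem.Str.lower (tokens[p]'hp)) "no_" then
          pvBLoop tokens window (if r > 0 then pvMark tokens p res else res) window (p + 1)
        else
          pvBLoop tokens window (if r > 0 then pvMark tokens p res else res)
            (if r > 0 then r - 1 else r) (p + 1) := by
  rw [pvBLoop, dif_pos hp]
  simp only [pvMark, List.getD_eq_getElem tokens "" hp]

-- A lowered stop-token is never a negation trigger (the two literal sets are disjoint
-- and no stop-token starts with "no_").
theorem pvStop_not_trigger (t : String) (h : pvNegStop.contains t = true) :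
    (pvNegTriggers.contains t || PySem.Str.startswith t "no_") = false := by
  simp only [pvNegStop, List.contains_eq_mem, List.mem_cons, List.not_mem_nil, or_false,
    decide_eq_true_eq] at h
  rcases h with rfl|rfl|rfl|rfl|rfl|rfl|rfl|rfl|rfl|rfl|rfl|rfl|rfl|rfl|rfl <;> decide

-- The single pass with `remaining = r` equals: finish the open window of budget r
-- (A's inner loop), then run A's outer loop from the same index.
theorem pvBridge (tokens : List String) (window : Int) :
    ∀ i res (r : Int), (0 < r → r ≤ window) →
      pvBLoop tokens window res r i = pvAOuter tokens window (pvMarkW tokens r i res) i := by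
  have H : ∀ n i res (r : Int), tokens.length - i ≤ n → (0 < r → r ≤ window) →
      pvBLoop tokens window res r i = pvAOuter tokens window (pvMarkW tokens r i res) i := by
    intro n
    induction n with
    | zero =>
      intro i res r hn hr
      have hi : ¬ i < tokens.length := by omega
      rw [pvBLoop_oob tokens window res r i hi, pvMarkW_oob tokens r i res hi,
          pvAOuter_oob tokens window res i hi]
    | succ n ih =>
      intro i res r hn hr
      by_cases hi : i < tokens.length
      · rw [pvBLoop_step tokens window res r i hi]
        by_cases hs : pvNegStop.contains (PySem.Str.lower (tokens[i]'hi)) = true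
        · -- stop token: window dies; A marks nothing here and it is not a trigger
          rw [if_pos hs, ih (i + 1) res 0 (by omega) (by omega)]
          rw [pvMarkW_nonpos tokens 0 (i + 1) res le_rfl]
          have hmw : pvMarkW tokens r i res = res := by
            by_cases hrp : 0 < r
            · rw [pvMarkW_step tokens r i res hi hrp, if_pos hs]
            · exact pvMarkW_nonpos tokens r i res (by omega)
          have hnt : ¬ ((pvNegTriggers.contains (PySem.Str.lower (tokens[i]'hi)) ||
              PySem.Str.startswith (PySem.Str.lower (tokens[i]'hi)) "no_") = true) := by
            rw [pvStop_not_trigger _ hs]; simp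
          rw [hmw, pvAOuter_step tokens window res i hi, if_neg hnt]
        · rw [if_neg hs]
          by_cases hrp : r > 0
          · -- inside an open window: A's pending inner loop marks position i too
            have hmw : pvMarkW tokens r i res =
                pvMarkW tokens (r - 1) (i + 1) (pvMark tokens i res) := by
              rw [pvMarkW_step tokens r i res hi hrp, if_neg hs]
            rw [if_pos hrp, if_pos hrp]
            by_cases ht : (pvNegTriggers.contains (PySem.Str.lower (tokens[i]'hi)) ||
                PySem.Str.startswith (PySem.Str.lower (tokens[i]'hi)) "no_") = true
            · rw [if_pos ht, ih (i + 1) (pvMark tokens i res) window (by omega) (by omega)]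
              rw [hmw, pvAOuter_step tokens window _ i hi, if_pos ht]
              rw [pvAInner_eq_pvMarkW tokens window _ 0 (i + 1)]
              rw [pvMarkW_absorb tokens (window - 0) (r - 1) (i + 1) (pvMark tokens i res)
                    (by omega)]
              congr 2
              omega
            · rw [if_neg ht, ih (i + 1) (pvMark tokens i res) (r - 1) (by omega) (by omega)]
              rw [hmw, pvAOuter_step tokens window _ i hi, if_neg ht]
          · -- no open window: nothing pending
            have hmw : pvMarkW tokens r i res = res :=
              pvMarkW_nonpos tokens r i res (by omega)
            rw [if_neg hrp, if_neg hrp]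
            by_cases ht : (pvNegTriggers.contains (PySem.Str.lower (tokens[i]'hi)) ||
                PySem.Str.startswith (PySem.Str.lower (tokens[i]'hi)) "no_") = true
            · rw [if_pos ht, ih (i + 1) res window (by omega) (by omega)]
              rw [hmw, pvAOuter_step tokens window res i hi, if_pos ht]
              rw [pvAInner_eq_pvMarkW tokens window res 0 (i + 1)]
              congr 2
              omega
            · rw [if_neg ht, ih (i + 1) res r (by omega) hr]
              rw [hmw, pvAOuter_step tokens window res i hi, if_neg ht,
                  pvMarkW_nonpos tokens r (i + 1) res (by omega)]
      · rw [pvBLoop_oob tokens window res r i hi, pvMarkW_oob tokens r i res hi,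
            pvAOuter_oob tokens window res i hi]
  exact fun i res r hr => H (tokens.length - i) i res r le_rfl hr

-- ===== VERDICT (by name: the statement is the Claim_ definition above) =====
theorem apply_negation_window_py_spec : Claim_equal_apply_negation_window_py := by
  intro tokens window _
  unfold Spec_apply_negation_window_py apply_negation_window_py apply_negation_window_py_alt
  rw [pvBridge tokens window 0 tokens 0 (by omega), pvMarkW_nonpos _ _ _ _ le_rfl]
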